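-- pv_equiv track=rewrite | github.com/F4NTOM41K/SAI | data_analysis/analysis.py | filter_empty_fields
-- ===== SOURCE A (Python) =====
-- def filter_empty_fields(data, required_fields):
--     """
--     Фильтрует записи, удаляя те, где есть пустые значения в указанных полях.
--     """
--     filtered_data = []
--     empty_counts = {field: 0 for field in required_fields}
--
--     for item in data:
--         skip = False
--         for field in required_fields:
--             if not item.get(field):
--                 empty_counts[field] += 1
--                 skip = True
--         if not skip:
--             filtered_data.append(item)
--
--     return filtered_data, empty_counts
-- ===== SOURCE B (Python) =====
-- def filter_empty_fields(data, required_fields):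
--     data = list(data)
--     filtered_data = [item for item in data
--                      if all(item.get(f) for f in required_fields)]
--     empty_counts = {f: 0 for f in required_fields}
--     for field in required_fields:
--         for item in data:
--             if not item.get(field):
--                 empty_counts[field] += 1
--     return filtered_data, empty_counts
-- ===== Notes on version B (the rewrite author's own statement) =====
-- stated objective: simpler
-- what changed: Replaces the single record-loop with per-item skip flag by a one-pass comprehension for the filtered list plus a separate field-outer counting loop (loop order swapped), which is valid because increments to each counter commute.
import Mathlib
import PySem

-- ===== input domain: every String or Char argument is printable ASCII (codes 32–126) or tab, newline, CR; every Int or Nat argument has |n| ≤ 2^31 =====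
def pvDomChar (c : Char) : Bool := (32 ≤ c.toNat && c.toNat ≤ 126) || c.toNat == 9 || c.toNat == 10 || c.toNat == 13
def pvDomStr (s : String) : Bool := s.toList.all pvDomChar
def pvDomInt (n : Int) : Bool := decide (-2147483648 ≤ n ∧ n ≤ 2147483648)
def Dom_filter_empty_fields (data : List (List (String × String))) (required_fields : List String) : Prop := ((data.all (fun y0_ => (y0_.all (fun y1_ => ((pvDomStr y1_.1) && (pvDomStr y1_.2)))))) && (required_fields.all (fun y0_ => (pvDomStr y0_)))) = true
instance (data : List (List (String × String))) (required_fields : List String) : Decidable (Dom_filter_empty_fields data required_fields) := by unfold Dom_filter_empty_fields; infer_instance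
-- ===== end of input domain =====

-- B replaces A's single record-loop with per-item skip flag by a filtering comprehension
-- plus a separate field-outer counting loop (loop order swapped); same return value; objective: simpler.

-- shared helper: Python's 'not item.get(field)' (missing key or empty-string value is falsy)
def pvFalsy (item : List (String × String)) (field : String) : Bool :=
  ((PySem.Dict.ofList item).getD field "") == ""

-- ===== PORT A =====
def filter_empty_fields (data : List (List (String × String))) (required_fields : List String) : (List (List (String × String))) × (List (String × Int)) :=
  -- empty_counts = {field: 0 for field in required_fields}
  let empty_counts0 : PySem.Dict String Int :=
    required_fields.foldl (fun d field => d.insert field (0 : Int)) PySem.Dict.empty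
  -- for item in data: skip = False; for field in required_fields: …; if not skip: append
  let res := data.foldl
    (fun (acc : List (List (String × String)) × PySem.Dict String Int) item =>
      let inner := required_fields.foldl
        (fun (p : PySem.Dict String Int × Bool) field =>
          if pvFalsy item field then (p.1.modify field 0 (· + 1), true) else p)
        (acc.2, false)
      (if inner.2 then acc.1 else acc.1 ++ [item], inner.1))
    ([], empty_counts0)
  (res.1, res.2.items)

-- ===== PORT B =====
def filter_empty_fields_alt (data : List (List (String × String))) (required_fields : List String) : (List (List (String × String))) × (List (String × Int)) :=
  -- filtered_data = [item for item in data if all(item.get(f) for f in required_fields)]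
  let filtered := data.filter (fun item => required_fields.all (fun f => !(pvFalsy item f)))
  -- empty_counts = {f: 0 for f in required_fields}; then the field-outer counting loop
  let counts := required_fields.foldl
    (fun d field =>
      data.foldl (fun d item => if pvFalsy item field then d.modify field 0 (· + 1) else d) d)
    (required_fields.foldl (fun d f => d.insert f (0 : Int)) PySem.Dict.empty)
  (filtered, counts.items)

-- ===== PRECONDITION & SPEC =====
def Spec_filter_empty_fields (data : List (List (String × String))) (required_fields : List String) (out : (List (List (String × String))) × (List (String × Int))) : Prop := out = filter_empty_fields_alt data required_fields
instance (data : List (List (String × String))) (required_fields : List String) (out : (List (List (String × String))) × (List (String × Int))) : Decidable (Spec_filter_empty_fields data required_fields out) := by unfold Spec_filter_empty_fields; infer_instance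

-- ===== CLAIM (what is proved, stated in full; the proofs are below) =====
def Claim_equal_filter_empty_fields : Prop := ∀ (data : List (List (String × String))) (required_fields : List String), Dom_filter_empty_fields data required_fields → Spec_filter_empty_fields data required_fields (filter_empty_fields data required_fields)

-- ===== LEMMAS AND PROOFS =====

-- A's per-item increment over required_fields (the counts component of A's inner loop)
def pvIncItem (rf : List String) (d : PySem.Dict String Int) (item : List (String × String)) : PySem.Dict String Int :=
  rf.foldl (fun d field => if pvFalsy item field then d.modify field 0 (· + 1) else d) d

-- A's inner loop: counts component ignores the flag, the flag becomes 'any field falsy'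
theorem pvInnerA (rf : List String) (item : List (String × String)) :
    ∀ (d : PySem.Dict String Int) (b : Bool),
    rf.foldl (fun (p : PySem.Dict String Int × Bool) field =>
        if pvFalsy item field then (p.1.modify field 0 (· + 1), true) else p) (d, b)
    = (pvIncItem rf d item, b || rf.any (pvFalsy item)) := by
  induction rf with
  | nil => intro d b; simp [pvIncItem]
  | cons f rest ih =>
    intro d b
    by_cases h : pvFalsy item f
    · simp [pvIncItem, List.foldl_cons, h, ih]
    · simp [pvIncItem, List.foldl_cons, h, ih]

-- A's loop body, rewritten by pvInnerA
theorem pvBodyA (rf : List String) :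
    (fun (acc : List (List (String × String)) × PySem.Dict String Int) item =>
      let inner := rf.foldl
        (fun (p : PySem.Dict String Int × Bool) field =>
          if pvFalsy item field then (p.1.modify field 0 (· + 1), true) else p)
        (acc.2, false)
      (if inner.2 then acc.1 else acc.1 ++ [item], inner.1))
    = (fun acc item =>
      ((if rf.any (pvFalsy item) then acc.1 else acc.1 ++ [item]), pvIncItem rf acc.2 item)) := by
  funext acc item
  simp only [pvInnerA, Bool.false_or]

-- A's outer loop splits into two independent folds
theorem pvOuterA (rf : List String) (data : List (List (String × String))) :
    ∀ (l : List (List (String × String))) (d : PySem.Dict String Int),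
    data.foldl (fun acc item =>
        ((if rf.any (pvFalsy item) then acc.1 else acc.1 ++ [item]), pvIncItem rf acc.2 item)) (l, d)
    = (l ++ data.filter (fun item => !(rf.any (pvFalsy item))),
       data.foldl (pvIncItem rf) d) := by
  induction data with
  | nil => intro l d; simp
  | cons item rest ih =>
    intro l d
    rw [List.foldl_cons, List.foldl_cons]
    cases h : rf.any (pvFalsy item)
    · simp only [h, List.filter_cons, Bool.not_false, reduceIte, Bool.false_eq_true]
      rw [ih (l ++ [item]) (pvIncItem rf d item)]
      simp
    · simp only [h, List.filter_cons, Bool.not_true, reduceIte]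
      exact ih l (pvIncItem rf d item)

-- getD after one item's increments
theorem pvGetD_incItem (rf : List String) (item : List (String × String)) (d : PySem.Dict String Int) (k : String) :
    (pvIncItem rf d item).getD k 0
    = d.getD k 0 + if pvFalsy item k then (rf.count k : Int) else 0 := by
  unfold pvIncItem
  rw [PySem.List.foldl_if_eq_foldl_filter, PySem.Dict.getD_foldl_modify_add_one]
  congr 1
  by_cases h : pvFalsy item k
  · rw [if_pos h, List.count_filter h]
  · rw [if_neg h]
    norm_num
    exact List.count_eq_zero.mpr (fun hm => h (List.of_mem_filter hm))

-- getD after A's whole counting loop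
theorem pvGetD_A (rf : List String) (data : List (List (String × String))) (k : String) :
    ∀ (d : PySem.Dict String Int),
    (data.foldl (pvIncItem rf) d).getD k 0
    = d.getD k 0 + (rf.count k : Int) * (data.countP (fun item => pvFalsy item k) : Int) := by
  induction data with
  | nil => intro d; simp
  | cons item rest ih =>
    intro d
    rw [List.foldl_cons, ih, pvGetD_incItem, List.countP_cons]
    by_cases h : pvFalsy item k
    · simp only [h, reduceIte]
      push_cast
      ring
    · simp [h]

-- B's inner loop for one field: repeated modify at that field
theorem pvGetD_B_inner (field : String) (data : List (List (String × String))) (k : String) :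
    ∀ (d : PySem.Dict String Int),
    (data.foldl (fun d item => if pvFalsy item field then d.modify field 0 (· + 1) else d) d).getD k 0
    = d.getD k 0 + if k = field then (data.countP (fun item => pvFalsy item field) : Int) else 0 := by
  induction data with
  | nil => intro d; simp
  | cons item rest ih =>
    intro d
    rw [List.foldl_cons, ih, List.countP_cons]
    by_cases h : pvFalsy item field
    · rw [if_pos h, PySem.Dict.getD_modify]
      by_cases hk : k = field
      · simp only [hk, h, reduceIte]
        push_cast
        ring
      · simp [hk]
    · rw [if_neg h]
      by_cases hk : k = field <;> simp [h, hk]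

-- getD after B's whole counting loop
theorem pvGetD_B (data : List (List (String × String))) (rf : List String) (k : String) :
    ∀ (d : PySem.Dict String Int),
    (rf.foldl (fun d field =>
        data.foldl (fun d item => if pvFalsy item field then d.modify field 0 (· + 1) else d) d) d).getD k 0
    = d.getD k 0 + (rf.count k : Int) * (data.countP (fun item => pvFalsy item k) : Int) := by
  induction rf with
  | nil => intro d; simp
  | cons f rest ih =>
    intro d
    rw [List.foldl_cons, ih, pvGetD_B_inner, List.count_cons]
    by_cases hk : k = f
    · subst hk; simp; ring
    · simp [hk, Ne.symm hk]

-- contains is preserved by A's per-item increments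
theorem pvContains_incItem (rf : List String) (item : List (String × String)) (d : PySem.Dict String Int) (k : String)
    (h : d.contains k = true) : (pvIncItem rf d item).contains k = true := by
  unfold pvIncItem
  induction rf generalizing d with
  | nil => exact h
  | cons f rest ih =>
    rw [List.foldl_cons]
    by_cases hf : pvFalsy item f
    · rw [if_pos hf]; exact ih _ (by rw [PySem.Dict.contains_modify]; simp [h])
    · rw [if_neg hf]; exact ih _ h

-- a modify at a contained key keeps the key list
theorem pvKeys_modify_contained (d : PySem.Dict String Int) (k : String) (f : Int → Int)
    (h : d.contains k = true) : (d.modify k 0 f).keys = d.keys := by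
  rw [PySem.Dict.keys_modify, PySem.Dict.keys_insert_of_contains _ _ h]

-- keys are unchanged by A's per-item increments when every field is already a key
theorem pvKeys_incItem (rf : List String) (item : List (String × String)) :
    ∀ (d : PySem.Dict String Int), (∀ f ∈ rf, d.contains f = true) →
    (pvIncItem rf d item).keys = d.keys := by
  induction rf with
  | nil => intro d _; rfl
  | cons f rest ih =>
    intro d hc
    unfold pvIncItem
    rw [List.foldl_cons]
    by_cases hf : pvFalsy item f
    · rw [if_pos hf]
      have hc' : ∀ g ∈ rest, (d.modify f 0 (· + 1)).contains g = true := by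
        intro g hg; rw [PySem.Dict.contains_modify]; simp [hc g (by simp [hg])]
      have := ih (d.modify f 0 (· + 1)) hc'
      unfold pvIncItem at this
      rw [this, pvKeys_modify_contained d f _ (hc f (by simp))]
    · rw [if_neg hf]
      have := ih d (fun g hg => hc g (by simp [hg]))
      unfold pvIncItem at this
      rw [this]

theorem pvKeys_A (rf : List String) (data : List (List (String × String))) :
    ∀ (d : PySem.Dict String Int), (∀ f ∈ rf, d.contains f = true) →
    (data.foldl (pvIncItem rf) d).keys = d.keys := by
  induction data with
  | nil => intro d _; rfl
  | cons item rest ih =>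
    intro d hc
    rw [List.foldl_cons]
    have hc' : ∀ f ∈ rf, (pvIncItem rf d item).contains f = true :=
      fun f hf => pvContains_incItem rf item d f (hc f hf)
    rw [ih _ hc', pvKeys_incItem rf item d hc]

-- B's inner loop for one field preserves keys and contains
theorem pvContains_B_inner (field : String) (data : List (List (String × String))) (k : String) :
    ∀ (d : PySem.Dict String Int), d.contains k = true →
    (data.foldl (fun d item => if pvFalsy item field then d.modify field 0 (· + 1) else d) d).contains k = true := by
  induction data with
  | nil => exact fun d h => h
  | cons item rest ih =>
    intro d h
    rw [List.foldl_cons]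
    by_cases hf : pvFalsy item field
    · rw [if_pos hf]; exact ih _ (by rw [PySem.Dict.contains_modify]; simp [h])
    · rw [if_neg hf]; exact ih _ h

theorem pvKeys_B_inner (field : String) (data : List (List (String × String))) :
    ∀ (d : PySem.Dict String Int), d.contains field = true →
    (data.foldl (fun d item => if pvFalsy item field then d.modify field 0 (· + 1) else d) d).keys = d.keys := by
  induction data with
  | nil => intro d _; rfl
  | cons item rest ih =>
    intro d h
    rw [List.foldl_cons]
    by_cases hf : pvFalsy item field
    · rw [if_pos hf, ih _ (by rw [PySem.Dict.contains_modify]; simp [h]),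
         pvKeys_modify_contained d field _ h]
    · rw [if_neg hf, ih _ h]

theorem pvKeys_B (data : List (List (String × String))) (rf' : List String) :
    ∀ (d : PySem.Dict String Int), (∀ f ∈ rf', d.contains f = true) →
    (rf'.foldl (fun d field =>
        data.foldl (fun d item => if pvFalsy item field then d.modify field 0 (· + 1) else d) d) d).keys = d.keys := by
  induction rf' with
  | nil => intro d _; rfl
  | cons f rest ih =>
    intro d hc
    rw [List.foldl_cons]
    have hcf : d.contains f = true := hc f (by simp)
    have hc' : ∀ g ∈ rest,
        (data.foldl (fun d item => if pvFalsy item f then d.modify f 0 (· + 1) else d) d).contains g = true :=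
      fun g hg => pvContains_B_inner f data g d (hc g (by simp [hg]))
    rw [ih _ hc', pvKeys_B_inner f data d hcf]

-- the initial dict: every required field is a key, and keys are nodup
theorem pvContains_init (rf : List String) (f : String) (hf : f ∈ rf) :
    (rf.foldl (fun d field => d.insert field (0 : Int)) PySem.Dict.empty).contains f = true := by
  rw [PySem.Dict.contains_iff_mem_keys,
      PySem.Dict.keys_foldl_insert rf (fun _ _ => (0 : Int)) PySem.Dict.empty]
  show f ∈ PySem.Set.update [] rf
  rw [PySem.Set.update_nil_left, PySem.Set.mem_ofList]
  exact hf

theorem pvNodup_init (rf : List String) :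
    (rf.foldl (fun d field => d.insert field (0 : Int)) PySem.Dict.empty).keys.Nodup :=
  PySem.Dict.nodup_keys_foldl_insert rf (fun _ _ => (0 : Int)) PySem.Dict.empty
    PySem.Dict.nodup_keys_empty

-- ===== VERDICT (by name: the statement is the Claim_ definition above) =====
theorem filter_empty_fields_spec : Claim_equal_filter_empty_fields := by
  intro data rf _
  show filter_empty_fields data rf = filter_empty_fields_alt data rf
  unfold filter_empty_fields filter_empty_fields_alt
  rw [pvBodyA]
  dsimp only
  rw [pvOuterA]
  set d0 := rf.foldl (fun d field => d.insert field (0 : Int)) PySem.Dict.empty with hd0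
  have hc0 : ∀ f ∈ rf, d0.contains f = true := fun f hf => pvContains_init rf f hf
  have hnd0 : d0.keys.Nodup := pvNodup_init rf
  have hkA : (data.foldl (pvIncItem rf) d0).keys = d0.keys := pvKeys_A rf data d0 hc0
  have hkB : (rf.foldl (fun d field =>
      data.foldl (fun d item => if pvFalsy item field then d.modify field 0 (· + 1) else d) d) d0).keys
      = d0.keys := pvKeys_B data rf d0 hc0
  refine Prod.ext ?_ ?_
  · -- filtered lists agree: not-any-falsy = all-not-falsy
    show [] ++ data.filter (fun item => !(rf.any (pvFalsy item)))
        = data.filter (fun item => rf.all (fun f => !(pvFalsy item f)))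
    rw [List.nil_append]
    apply List.filter_congr
    intro item _
    rw [List.all_eq_not_any_not]
    simp
  · -- counter dicts agree item-list for item-list
    show (data.foldl (pvIncItem rf) d0).items
        = (rf.foldl (fun d field =>
            data.foldl (fun d item => if pvFalsy item field then d.modify field 0 (· + 1) else d) d) d0).items
    rw [PySem.Dict.items_eq_map_keys _ (by rw [hkA]; exact hnd0) 0,
        PySem.Dict.items_eq_map_keys _ (by rw [hkB]; exact hnd0) 0,
        hkA, hkB]
    apply List.map_congr_left
    intro k _
    rw [pvGetD_A, pvGetD_B]
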